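-- pv_equiv track=rewrite | github.com/LandyGuo/Rubbish | request_util.py | _split_tasks
-- ===== SOURCE A (Python) =====
-- def _split_tasks(tasks, splits):
-- 	total_length = len(tasks)
-- 	num_splits = min(total_length, splits)
-- 	split_tasks = [[] for _ in range(num_splits)]
-- 	for i in range(total_length):
-- 		bin_num = i % num_splits
-- 		split_tasks[bin_num].append(tasks[i])
-- 	return split_tasks
-- ===== SOURCE B (Python) =====
-- def _split_tasks(tasks, splits):
-- 	num_splits = min(len(tasks), splits)
-- 	return [[tasks[i] for i in range(j, len(tasks), num_splits)]
-- 	        for j in range(num_splits)]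
-- ===== Notes on version B (the rewrite author's own statement) =====
-- stated objective: simpler
-- what changed: Instead of iterating over every task index and appending to bins[i % num_splits], B builds each bin directly as the stride j, j+num_splits, j+2*num_splits, ... - one comprehension per bin, no mutation.
import Mathlib
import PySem

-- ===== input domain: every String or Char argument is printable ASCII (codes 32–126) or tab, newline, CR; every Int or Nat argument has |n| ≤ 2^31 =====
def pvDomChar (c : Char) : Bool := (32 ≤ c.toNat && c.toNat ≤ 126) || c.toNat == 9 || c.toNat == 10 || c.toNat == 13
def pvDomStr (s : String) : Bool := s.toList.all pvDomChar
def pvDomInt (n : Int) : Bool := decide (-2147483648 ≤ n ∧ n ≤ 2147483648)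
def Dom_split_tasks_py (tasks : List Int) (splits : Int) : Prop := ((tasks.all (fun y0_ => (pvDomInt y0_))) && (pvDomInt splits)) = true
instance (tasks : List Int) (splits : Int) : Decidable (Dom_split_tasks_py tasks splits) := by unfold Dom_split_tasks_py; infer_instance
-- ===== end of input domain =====

-- B replaces A's single pass that appends each task to bins[i % num_splits] by building each
-- bin directly as the stride j, j+num_splits, j+2*num_splits, … (one comprehension per bin).

-- ===== PORT A =====
-- Literal port of A: build num_splits empty bins, then for i in range(len(tasks))
-- append tasks[i] to bin i % num_splits.  Under Pre_ the bin index is ≥ 0, so .toNat is exact.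
def split_tasks_py (tasks : List Int) (splits : Int) : List (List Int) :=
  let total_length : Int := tasks.length
  let num_splits : Int := min total_length splits
  let init : List (List Int) := (PySem.List.pyRange 0 num_splits 1).map (fun _ => ([] : List Int))
  (PySem.List.pyRange 0 total_length 1).foldl
    (fun acc i =>
      let bin_num := PySem.Int.mod i num_splits
      acc.modify bin_num.toNat (fun b => b ++ [PySem.List.pyGetD tasks i 0])) init

-- ===== PORT B =====
-- Literal port of B: one list per stride offset j, each built by range(j, len(tasks), num_splits).
def split_tasks_py_alt (tasks : List Int) (splits : Int) : List (List Int) :=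
  let num_splits : Int := min (tasks.length : Int) splits
  (PySem.List.pyRange 0 num_splits 1).map (fun j =>
    (PySem.List.pyRange j (tasks.length : Int) num_splits).map
      (fun i => PySem.List.pyGetD tasks i 0))

-- ===== PRECONDITION & SPEC =====
-- A raises on non-empty tasks with splits ≤ 0 (i % 0 is a ZeroDivisionError for splits = 0,
-- and indexing the empty bin list an IndexError for splits < 0); Pre_ excludes exactly those.
def Pre_split_tasks_py (tasks : List Int) (splits : Int) : Prop := tasks = [] ∨ 1 ≤ splits
instance (tasks : List Int) (splits : Int) : Decidable (Pre_split_tasks_py tasks splits) := by unfold Pre_split_tasks_py; infer_instance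
def pvWitness_split_tasks_py : List Int × Int := ([1, 2, 3, 4, 5], 2)

def Spec_split_tasks_py (tasks : List Int) (splits : Int) (out : List (List Int)) : Prop := out = split_tasks_py_alt tasks splits
instance (tasks : List Int) (splits : Int) (out : List (List Int)) : Decidable (Spec_split_tasks_py tasks splits out) := by unfold Spec_split_tasks_py; infer_instance

-- ===== CLAIM (what is proved, stated in full; the proofs are below) =====
def Claim_equal_split_tasks_py : Prop := ∀ (tasks : List Int) (splits : Int), Dom_split_tasks_py tasks splits → Pre_split_tasks_py tasks splits → Spec_split_tasks_py tasks splits (split_tasks_py tasks splits)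

-- ===== LEMMAS AND PROOFS =====

lemma modify_map_range {α : Type} (n : Nat) (f : Nat → α) (j : Nat) (g : α → α) :
    ((List.range n).map f).modify j g =
      (List.range n).map (fun t => if t = j then g (f t) else f t) := by
  apply List.ext_getElem
  · simp
  · intro k h1 h2
    simp [List.getElem_modify]
    split_ifs with h1 h2 h3 <;> first | rfl | omega

lemma pyRange_succ_top {s : Int} (a b : Int) (hs : 0 < s) (hab : a ≤ b) :
    PySem.List.pyRange a (b + 1) s =
      PySem.List.pyRange a b s ++ (if s ∣ b - a then [b] else []) := by
  rw [PySem.List.pyRange_of_pos _ _ hs, PySem.List.pyRange_of_pos _ _ hs]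
  have h1 : a < b + 1 := by omega
  rw [if_pos h1]
  by_cases hd : s ∣ b - a
  · obtain ⟨t, ht⟩ := id hd
    have hst : s * t = b - a := ht.symm
    have ht0 : 0 ≤ t := by nlinarith
    have e1 : (b + 1 - a + s - 1) / s = t + 1 := by
      have hexp : s * (t + 1) = s * t + s := by ring
      have : b + 1 - a + s - 1 = s * (t + 1) := by omega
      rw [this, Int.mul_ediv_cancel_left _ (by omega)]
    have e2 : (if a < b then ((b - a + s - 1) / s).toNat else 0) = t.toNat := by
      by_cases hab2 : a < b
      · rw [if_pos hab2]
        congr 1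
        have : b - a + s - 1 = s * t + (s - 1) := by omega
        rw [this, Int.mul_add_ediv_left _ _ (by omega : s ≠ 0) ,
            Int.ediv_eq_zero_of_lt (by omega) (by omega)]
        omega
      · have hba : a = b := by omega
        have ht' : t = 0 := by nlinarith
        simp [hab2, ht']
    rw [if_pos hd, e1, e2]
    have : (t + 1).toNat = t.toNat + 1 := by omega
    rw [this, List.range_succ, List.map_append]
    simp
    have hm : max t 0 = t := by omega
    rw [hm]
    omega
  · have hab2 : a < b := by
      rcases lt_or_eq_of_le hab with h | h
      · exact h
      · exact absurd (h ▸ ⟨0, by omega⟩) hd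
    rw [if_neg hd, if_pos hab2, List.append_nil]
    congr 2
    have hr0 : (b - a) % s ≠ 0 := fun h => hd (Int.dvd_of_emod_eq_zero h)
    have hq := Int.mul_ediv_add_emod (b - a) s
    set q := (b - a) / s
    set r := (b - a) % s
    have hr1 : 0 < r := lt_of_le_of_ne (Int.emod_nonneg _ (by omega)) (Ne.symm hr0)
    have hr2 : r < s := Int.emod_lt_of_pos _ hs
    have hexp : s * (q + 1) = s * q + s := by ring
    have e1 : b + 1 - a + s - 1 = s * (q + 1) + r := by omega
    have e2 : b - a + s - 1 = s * (q + 1) + (r - 1) := by omega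
    rw [e1, e2, Int.mul_add_ediv_left _ _ (by omega : s ≠ 0),
        Int.mul_add_ediv_left _ _ (by omega : s ≠ 0),
        Int.ediv_eq_zero_of_lt (by omega) (by omega),
        Int.ediv_eq_zero_of_lt (by omega) (by omega)]

lemma stride_empty {num : Int} (hnum : 0 < num) (j b : Int) (hb : b ≤ j) :
    PySem.List.pyRange j b num = [] := by
  rw [PySem.List.pyRange_of_pos _ _ hnum, if_neg (by omega)]
  simp

lemma loop_inv (tasks : List Int) (n : Nat) (hnum : 0 < (n : Int)) : ∀ (k : Nat),
    (PySem.List.pyRange 0 (k : Int) 1).foldl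
      (fun acc i =>
        acc.modify (PySem.Int.mod i (n : Int)).toNat (fun b => b ++ [PySem.List.pyGetD tasks i 0]))
      ((PySem.List.pyRange 0 (n : Int) 1).map (fun _ => ([] : List Int))) =
    (PySem.List.pyRange 0 (n : Int) 1).map (fun j =>
      (PySem.List.pyRange j (k : Int) (n : Int)).map (fun i => PySem.List.pyGetD tasks i 0)) := by
  intro k
  induction k with
  | zero =>
    rw [show ((0:Nat):Int) = 0 by rfl, PySem.List.pyRange_one_eq_nil (le_refl 0), List.foldl_nil]
    apply List.map_congr_left
    intro j hj
    rw [PySem.List.mem_pyRange_one] at hj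
    rw [stride_empty hnum j 0 hj.1]
    rfl
  | succ k ih =>
    rw [show ((k+1:Nat):Int) = (k:Int) + 1 by push_cast; ring,
        PySem.List.pyRange_one_succ_right (by positivity), List.foldl_append, ih]
    rw [List.foldl_cons, List.foldl_nil]
    rw [PySem.List.pyRange_zero_nat, List.map_map, List.map_map,
        PySem.Int.mod_eq_emod_of_pos hnum]
    have hj : ((k : Int) % (n : Int)).toNat = k % n := by
      omega
    rw [hj, modify_map_range]
    apply List.map_congr_left
    intro t ht
    rw [List.mem_range] at ht
    simp only [Function.comp]
    by_cases htk : t ≤ k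
    · rw [pyRange_succ_top _ _ hnum (by exact_mod_cast htk), List.map_append]
      have hcond : (t = k % n) ↔ ((n:Int) ∣ (k:Int) - (t:Int)) := by
        constructor
        · intro h
          refine Int.dvd_of_emod_eq_zero ?_
          rw [← Int.emod_eq_emod_iff_emod_sub_eq_zero, Int.emod_eq_of_lt (a := (t:Int)) (by positivity) (by exact_mod_cast ht)]
          omega
        · intro h
          have := Int.emod_eq_emod_iff_emod_sub_eq_zero.mpr (Int.emod_eq_zero_of_dvd h)
          rw [Int.emod_eq_of_lt (a := (t:Int)) (by positivity) (by exact_mod_cast ht)] at this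
          omega
      by_cases hc : t = k % n
      · rw [if_pos hc, if_pos (hcond.mp hc)]; simp
      · rw [if_neg hc, if_neg (fun hd => hc (hcond.mpr hd))]; simp
    · have h1 : PySem.List.pyRange (t:Int) ((k:Int)+1) (n:Int) = [] := stride_empty hnum (t:Int) ((k:Int)+1) (by omega)
      have h2 : PySem.List.pyRange (t:Int) (k:Int) (n:Int) = [] :=
        stride_empty hnum (t:Int) (k:Int) (by omega)
      have hc : ¬ (t = k % n) := by have := Nat.mod_le k n; omega
      rw [if_neg hc, h1, h2]

lemma ports_agree (tasks : List Int) (splits : Int)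
    (hpre : tasks = [] ∨ 1 ≤ splits) :
    split_tasks_py tasks splits = split_tasks_py_alt tasks splits := by
  simp only [split_tasks_py, split_tasks_py_alt]
  by_cases hL : tasks = []
  · subst hL
    rw [show ((([] : List Int).length : Int)) = 0 by rfl,
        PySem.List.pyRange_one_eq_nil (le_refl 0), List.foldl_nil,
        PySem.List.pyRange_one_eq_nil (b := min (0:Int) splits) (by omega)]
    rfl
  · have hs : 1 ≤ splits := by tauto
    have hL1 : 1 ≤ tasks.length := by
      cases tasks with
      | nil => exact absurd rfl hL
      | cons a l => simp
    set num : Int := min (tasks.length : Int) splits with hnum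
    have hpos : 0 < num := by omega
    obtain ⟨n, hn⟩ : ∃ n : Nat, num = (n : Int) := ⟨num.toNat, by omega⟩
    rw [hn]
    exact loop_inv tasks n (by omega) tasks.length

-- ===== VERDICT (by name: the statement is the Claim_ definition above) =====
theorem split_tasks_py_spec : Claim_equal_split_tasks_py := by
  intro tasks splits _ hpre
  exact ports_agree tasks splits hpre
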